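-- pv_equiv track=rewrite | github.com/miliar/Code_Jam_Webscraper | Solutions_python/Problem_181/1210.py | answer
-- ===== SOURCE A (Python) =====
-- def answer(S):
--     r = [S[0]]
--     for i in S[1:]:
--         if i < r[0]:
--             r.append(i)
--         else:
--             r = [i] + r
--     return "".join(r)
-- ===== SOURCE B (Python) =====
-- def answer(S):
--     n = len(S)
--     keep = [S[i] == max(S[:i + 1]) for i in range(n)]
--     records = [S[i] for i in range(n) if keep[i]]
--     rest = [S[i] for i in range(n) if not keep[i]]
--     return "".join(records[::-1]) + "".join(rest)
-- ===== Notes on version B (the rewrite author's own statement) =====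
-- stated objective: alternative
-- what changed: Replaces A's stateful loop of conditional prepends/appends by a declarative characterisation: a position is kept iff its char equals the maximum of its prefix; B builds that keep mask, partitions by comprehensions, and reverses the kept chars once.
import Mathlib
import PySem

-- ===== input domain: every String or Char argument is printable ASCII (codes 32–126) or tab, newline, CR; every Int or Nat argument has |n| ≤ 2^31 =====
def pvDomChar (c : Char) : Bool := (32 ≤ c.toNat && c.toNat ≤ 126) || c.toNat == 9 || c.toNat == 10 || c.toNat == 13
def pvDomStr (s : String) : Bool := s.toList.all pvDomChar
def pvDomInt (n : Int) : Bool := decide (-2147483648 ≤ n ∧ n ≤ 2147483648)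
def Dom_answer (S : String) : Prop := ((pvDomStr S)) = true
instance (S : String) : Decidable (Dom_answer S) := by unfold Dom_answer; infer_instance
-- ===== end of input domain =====

-- B replaces A's stateful conditional prepend/append loop by a declarative prefix-maximum
-- characterisation (keep mask + comprehension partition + one reverse); objective: alternative.


-- ===== PORT A =====
-- r starts as [S[0]]; each later char is appended if below r[0], else prepended.
def answerStep (r : List Char) (i : Char) : List Char :=
  if i < r.headD ' ' then r ++ [i] else i :: r

def answer (S : String) : String :=
  match S.toList with
  | [] => ""          -- Python raises IndexError here (excluded by Pre_answer)
  | c :: tail => String.mk (tail.foldl answerStep [c])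

-- ===== PORT B =====
-- Python max(cs) on a nonempty sequence of chars (Source B only calls it on nonempty prefixes)
def pyMaxC : List Char → Char
  | [] => ' '
  | h :: t => t.foldl max h

-- keep[i] = (S[i] == max(S[:i+1]))
def keepB (l : List Char) (i : Nat) : Bool :=
  l.getD i ' ' == pyMaxC (l.take (i + 1))

-- records = [S[i] for i in range(n) if keep[i]]
def recB (l : List Char) : List Char :=
  (List.range l.length).filterMap (fun i => if keepB l i then some (l.getD i ' ') else none)

-- rest = [S[i] for i in range(n) if not keep[i]]
def rstB (l : List Char) : List Char :=
  (List.range l.length).filterMap (fun i => if keepB l i then none else some (l.getD i ' '))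

def answer_alt (S : String) : String :=
  String.mk ((recB S.toList).reverse ++ rstB S.toList)

-- ===== PRECONDITION & SPEC =====
-- Pre_ excludes only the empty string, on which A raises IndexError at S[0].
def Pre_answer (S : String) : Prop := S ≠ ""
instance (S : String) : Decidable (Pre_answer S) := by unfold Pre_answer; infer_instance
def pvWitness_answer : String := "bca"

def Spec_answer (S : String) (out : String) : Prop := out = answer_alt S
instance (S : String) (out : String) : Decidable (Spec_answer S out) := by unfold Spec_answer; infer_instance

-- ===== CLAIM (what is proved, stated in full; the proofs are below) =====
def Claim_equal_answer : Prop := ∀ (S : String), Dom_answer S → Pre_answer S → Spec_answer S (answer S)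

-- ===== LEMMAS AND PROOFS =====

lemma pyMaxC_append (l : List Char) (x : Char) (h : l ≠ []) :
    pyMaxC (l ++ [x]) = max (pyMaxC l) x := by
  cases l with
  | nil => exact absurd rfl h
  | cons a t => simp [pyMaxC, List.foldl_append]

lemma keepB_append (l : List Char) (x : Char) (i : Nat) (h : i < l.length) :
    keepB (l ++ [x]) i = keepB l i := by
  unfold keepB
  rw [List.getD_append _ _ _ _ h, List.take_append_of_le_length (by omega)]

lemma keepB_last (l : List Char) (x : Char) :
    keepB (l ++ [x]) l.length = (x == pyMaxC (l ++ [x])) := by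
  unfold keepB
  rw [List.getD_append_right _ _ _ _ (le_refl _), List.take_of_length_le (by simp)]
  simp

lemma recB_append (l : List Char) (x : Char) :
    recB (l ++ [x]) =
      recB l ++ (if keepB (l ++ [x]) l.length then [x] else []) := by
  unfold recB
  rw [show (l ++ [x]).length = l.length + 1 by simp, List.range_succ, List.filterMap_append]
  congr 1
  · exact List.filterMap_congr (fun i hi => by
      have hlt : i < l.length := List.mem_range.mp hi
      rw [keepB_append _ _ _ hlt, List.getD_append _ _ _ _ hlt])
  · by_cases hk : keepB (l ++ [x]) l.length <;>
      simp [hk]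

lemma rstB_append (l : List Char) (x : Char) :
    rstB (l ++ [x]) =
      rstB l ++ (if keepB (l ++ [x]) l.length then [] else [x]) := by
  unfold rstB
  rw [show (l ++ [x]).length = l.length + 1 by simp, List.range_succ, List.filterMap_append]
  congr 1
  · exact List.filterMap_congr (fun i hi => by
      have hlt : i < l.length := List.mem_range.mp hi
      rw [keepB_append _ _ _ hlt, List.getD_append _ _ _ _ hlt])
  · by_cases hk : keepB (l ++ [x]) l.length <;>
      simp [hk]

-- one loop step of A maps B's partition of l to B's partition of l ++ [x]
lemma step_case (l : List Char) (x : Char) (hne : l ≠ [])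
    (ih2 : (recB l).getLast? = some (pyMaxC l)) :
    answerStep ((recB l).reverse ++ rstB l) x
        = (recB (l ++ [x])).reverse ++ rstB (l ++ [x]) ∧
      (recB (l ++ [x])).getLast? = some (pyMaxC (l ++ [x])) := by
  have hm : pyMaxC (l ++ [x]) = max (pyMaxC l) x := pyMaxC_append l x hne
  have hrne : recB l ≠ [] := fun h => by rw [h] at ih2; simp at ih2
  have hhead : ((recB l).reverse ++ rstB l).headD ' ' = pyMaxC l := by
    have h1 : ((recB l).reverse ++ rstB l).head? = some (pyMaxC l) := by
      rw [List.head?_append_of_ne_nil _ (by simpa using hrne)]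
      simpa [List.head?_reverse] using ih2
    simp [List.headD_eq_head?_getD, h1]
  have hkl : keepB (l ++ [x]) l.length = (x == max (pyMaxC l) x) := by
    rw [keepB_last, hm]
  have hrec := recB_append l x
  have hrst := rstB_append l x
  by_cases hlt : x < pyMaxC l
  · have hmx : max (pyMaxC l) x = pyMaxC l := max_eq_left hlt.le
    have hkF : keepB (l ++ [x]) l.length = false := by
      rw [hkl, hmx]; exact beq_eq_false_iff_ne.mpr (ne_of_lt hlt)
    rw [hkF] at hrec hrst
    simp only [if_neg Bool.false_ne_true, List.append_nil] at hrec hrst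
    constructor
    · unfold answerStep
      rw [hhead, if_pos hlt, hrec, hrst, List.append_assoc]
    · rw [hrec, hm, hmx]; exact ih2
  · have hle : pyMaxC l ≤ x := le_of_not_gt hlt
    have hmx : max (pyMaxC l) x = x := max_eq_right hle
    have hkT : keepB (l ++ [x]) l.length = true := by
      rw [hkl, hmx]; simp
    rw [hkT] at hrec hrst
    simp only [if_pos trivial] at hrec hrst
    constructor
    · unfold answerStep
      rw [hhead, if_neg hlt, hrec, hrst]
      simp
    · rw [hrec, hm, hmx]
      simp

-- main invariant: A's loop state is B's partition, and the last record is the prefix maximum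
lemma main_inv (c : Char) (t : List Char) :
    t.foldl answerStep [c] = (recB (c :: t)).reverse ++ rstB (c :: t) ∧
      (recB (c :: t)).getLast? = some (pyMaxC (c :: t)) := by
  induction t using List.reverseRecOn with
  | nil => constructor <;> simp [recB, rstB, keepB, pyMaxC, List.range_succ]
  | append_singleton ts x ih =>
    obtain ⟨ih1, ih2⟩ := ih
    have h := step_case (c :: ts) x (by simp) ih2
    constructor
    · show (ts ++ [x]).foldl answerStep [c]
        = (recB ((c :: ts) ++ [x])).reverse ++ rstB ((c :: ts) ++ [x])
      rw [List.foldl_append, List.foldl_cons, List.foldl_nil, ih1]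
      exact h.1
    · exact h.2

-- ===== VERDICT (by name: the statement is the Claim_ definition above) =====
theorem answer_spec : Claim_equal_answer := by
  intro S _ _
  unfold Spec_answer answer answer_alt
  cases hS : S.toList with
  | nil => rfl
  | cons c tail => exact congrArg String.mk (main_inv c tail).1
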